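-- pv_equiv track=rewrite | github.com/kossick/adventofcode2022 | day_7/day_7_shite.py | find_directory_contents
-- ===== SOURCE A (Python) =====
-- from typing import Any, Dict, List
--
-- def get_command_indices(raw_data: List[str]) -> List[int]:
--     return [
--         index for index, line in enumerate(raw_data) if '$' in line
--     ]
--
-- def generate_sub_tree(raw_data: List[str], starting_index: int) -> List[str]:
--     sub_tree = list()
--     for line in raw_data[starting_index + 1:]:
--         if '$' in line:
--             break
--         sub_tree.append(line)
--     return sub_tree
--
-- def update_directory(directory_stack: List[str], address: str) -> List[str]:
--     if address == '..':
--         directory_stack.pop()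
--     else:
--         directory_stack.append(address)
--     return directory_stack
--
-- def find_directory_contents(raw_data: List[str]) -> Dict[str, List[str]]:
--     relative_file_tree = dict()
--     directory_stack = ['/']
--     command_indices = get_command_indices(raw_data)
--     for index in command_indices:
--         command = raw_data[index]
--         if 'cd' in command:
--             directory_stack = update_directory(
--                 directory_stack,
--                 command.split('cd ')[-1]
--             )
--         else:
--             relative_file_tree[directory_stack[-1]] = generate_sub_tree(
--                 raw_data,
--                 index
--             )
--     return relative_file_tree
-- ===== SOURCE B (Python) =====
-- from typing import Dict, List
--
-- def find_directory_contents(raw_data: List[str]) -> Dict[str, List[str]]: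
--     relative_file_tree = dict()
--     directory_stack = ['/']
--     current = None
--     for line in raw_data:
--         if '$' in line:
--             if 'cd' in line:
--                 address = line.split('cd ')[-1]
--                 if address == '..':
--                     directory_stack.pop()
--                 else:
--                     directory_stack.append(address)
--                 current = None
--             else:
--                 current = directory_stack[-1]
--                 relative_file_tree[current] = []
--         elif current is not None:
--             relative_file_tree[current].append(line)
--     return relative_file_tree
-- ===== Notes on version B (the rewrite author's own statement) =====
-- stated objective: alternative
-- what changed: B replaces A's rescan-and-slice design (collect all command indices, then for every ls re-index the list and copy a fresh slice scanned line by line) with a single forward pass that keeps the directory stack and the currently open ls entry, appending each file line once.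
import Mathlib
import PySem

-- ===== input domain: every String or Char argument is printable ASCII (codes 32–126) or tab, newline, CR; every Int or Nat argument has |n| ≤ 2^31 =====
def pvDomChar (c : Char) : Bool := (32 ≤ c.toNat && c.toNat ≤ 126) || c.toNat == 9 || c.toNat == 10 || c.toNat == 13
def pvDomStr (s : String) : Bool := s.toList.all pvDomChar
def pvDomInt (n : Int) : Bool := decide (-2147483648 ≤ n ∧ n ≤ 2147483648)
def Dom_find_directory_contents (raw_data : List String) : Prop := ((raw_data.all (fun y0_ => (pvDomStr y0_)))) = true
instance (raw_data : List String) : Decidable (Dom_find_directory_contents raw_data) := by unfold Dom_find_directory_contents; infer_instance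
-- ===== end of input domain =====

-- B replaces A's rescan-and-slice design (collect all command indices, then re-slice and
-- rescan the list for every `ls`) by one forward pass that maintains the directory stack and
-- the currently-open `ls` entry; same return value everywhere A returns.

-- ===== PORT A =====
def get_command_indices (raw_data : List String) : List Int :=
  ((PySem.List.enumerate raw_data 0).filter (fun p => PySem.Str.isIn "$" p.2)).map (·.1)

-- the for/break loop of generate_sub_tree
def gen_sub_loop (sub_tree : List String) : List String → List String
  | [] => sub_tree
  | line :: rest =>
    if PySem.Str.isIn "$" line then sub_tree
    else gen_sub_loop (sub_tree ++ [line]) rest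

def generate_sub_tree (raw_data : List String) (starting_index : Int) : List String :=
  gen_sub_loop [] (PySem.List.slice raw_data (some (starting_index + 1)) none)

-- directory_stack.pop() raises IndexError on an empty stack: the port returns [] there
-- (exactly those inputs are excluded by Pre_find_directory_contents).
def update_directory (directory_stack : List String) (address : String) : List String :=
  if address == ".." then ((PySem.List.pop? directory_stack).map (·.2)).getD []
  else directory_stack ++ [address]

def find_directory_contents (raw_data : List String) : List (String × List String) :=
  (((get_command_indices raw_data).foldl
    (fun (st : PySem.Dict String (List String) × List String) index =>
      let command := PySem.List.pyGetD raw_data index ""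
      if PySem.Str.isIn "cd" command then
        (st.1, update_directory st.2
          (PySem.List.pyGetD ((PySem.Str.split? command "cd ").getD []) (-1) ""))
      else
        -- directory_stack[-1] raises IndexError on an empty stack: default "" is never
        -- reached under Pre_find_directory_contents
        (st.1.insert (PySem.List.pyGetD st.2 (-1) "") (generate_sub_tree raw_data index), st.2))
    (PySem.Dict.empty, ["/"])).1).items

-- ===== PORT B =====
-- single forward pass; `current` is the key of the open `ls` block (None in Python).
-- relative_file_tree[current].append(line): `current` is always a present key when it is
-- `some`, so Dict.modify with default [] is exact there.
def alt_go (tree : PySem.Dict String (List String)) (directory_stack : List String)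
    (current : Option String) : List String → PySem.Dict String (List String)
  | [] => tree
  | line :: rest =>
    if PySem.Str.isIn "$" line then
      if PySem.Str.isIn "cd" line then
        let address := PySem.List.pyGetD ((PySem.Str.split? line "cd ").getD []) (-1) ""
        let stack' := if address == ".." then ((PySem.List.pop? directory_stack).map (·.2)).getD []
                      else directory_stack ++ [address]
        alt_go tree stack' none rest
      else
        let key := PySem.List.pyGetD directory_stack (-1) ""
        alt_go (tree.insert key []) directory_stack (some key) rest
    else
      match current with
      | some k => alt_go (tree.modify k [] (· ++ [line])) directory_stack current rest
      | none => alt_go tree directory_stack none rest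

def find_directory_contents_alt (raw_data : List String) : List (String × List String) :=
  (alt_go PySem.Dict.empty ["/"] none raw_data).items

-- ===== PRECONDITION & SPEC =====
-- helpers for Pre_ only: the 'cd' target of a line, and its effect on the stack depth
def pvAddr (s : String) : String :=
  PySem.List.pyGetD ((PySem.Str.split? s "cd ").getD []) (-1) ""
def pvDelta (s : String) : Int :=
  if PySem.Str.isIn "$" s && PySem.Str.isIn "cd" s then (if pvAddr s == ".." then -1 else 1) else 0
-- a command line that reads the stack: `ls` peeks stack[-1], `cd ..` pops
def pvNeedsStack (s : String) : Bool :=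
  PySem.Str.isIn "$" s && (!(PySem.Str.isIn "cd" s) || pvAddr s == "..")

-- Pre_ excludes exactly the inputs on which A raises IndexError: those where some command
-- line peeks or pops the directory stack while it is empty (the stack depth before line i
-- is 1 plus the sum of the cd-deltas of the earlier lines). B raises there as well.
def Pre_find_directory_contents (raw_data : List String) : Prop :=
  ∀ i : Nat, i < raw_data.length → pvNeedsStack (raw_data.getD i "") = true →
    0 < 1 + ((raw_data.take i).map pvDelta).sum
instance (raw_data : List String) : Decidable (Pre_find_directory_contents raw_data) := by
  unfold Pre_find_directory_contents; infer_instance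

def pvWitness_find_directory_contents : List String :=
  ["$ cd /", "$ ls", "dir a", "100 b.txt", "$ cd a", "$ ls", "3 c.txt", "$ cd .."]

def Spec_find_directory_contents (raw_data : List String) (out : List (String × List String)) : Prop := out = find_directory_contents_alt raw_data
instance (raw_data : List String) (out : List (String × List String)) : Decidable (Spec_find_directory_contents raw_data out) := by unfold Spec_find_directory_contents; infer_instance

-- ===== CLAIM (what is proved, stated in full; the proofs are below) =====
def Claim_equal_find_directory_contents : Prop := ∀ (raw_data : List String), Dom_find_directory_contents raw_data → Pre_find_directory_contents raw_data → Spec_find_directory_contents raw_data (find_directory_contents raw_data)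

-- ===== LEMMAS AND PROOFS =====
-- (the two ports happen to agree even on the excluded inputs, because both total ports
-- resolve the IndexError points with the same defaults; the proof below is unconditional)

-- common recursive description of both ports
def runA (tree : PySem.Dict String (List String)) (stack : List String) :
    List String → PySem.Dict String (List String)
  | [] => tree
  | x :: xs =>
    if PySem.Str.isIn "$" x then
      if PySem.Str.isIn "cd" x then
        runA tree (update_directory stack
          (PySem.List.pyGetD ((PySem.Str.split? x "cd ").getD []) (-1) "")) xs
      else
        runA (tree.insert (PySem.List.pyGetD stack (-1) "")
          (xs.takeWhile (fun l => !PySem.Str.isIn "$" l))) stack xs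
    else runA tree stack xs

-- A's fold body, named
def stepA (raw_data : List String) (st : PySem.Dict String (List String) × List String)
    (index : Int) : PySem.Dict String (List String) × List String :=
  let command := PySem.List.pyGetD raw_data index ""
  if PySem.Str.isIn "cd" command then
    (st.1, update_directory st.2
      (PySem.List.pyGetD ((PySem.Str.split? command "cd ").getD []) (-1) ""))
  else
    (st.1.insert (PySem.List.pyGetD st.2 (-1) "") (generate_sub_tree raw_data index), st.2)

theorem find_eq_foldl_stepA (raw_data : List String) :
    find_directory_contents raw_data =
      (((get_command_indices raw_data).foldl (stepA raw_data) (PySem.Dict.empty, ["/"])).1).items := rfl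

theorem gen_sub_loop_eq (l acc : List String) :
    gen_sub_loop acc l = acc ++ l.takeWhile (fun s => !PySem.Str.isIn "$" s) := by
  induction l generalizing acc with
  | nil => simp [gen_sub_loop]
  | cons x xs ih =>
    by_cases h : PySem.Chars.isIn ['$'] x.toList
    · simp [gen_sub_loop, h, List.takeWhile]
    · simp [gen_sub_loop, h, List.takeWhile, ih]


theorem enumerate_shift {α : Type} (xs : List α) (s : Int) :
    PySem.List.enumerate xs (s + 1) = (PySem.List.enumerate xs s).map (fun p => (p.1 + 1, p.2)) := by
  induction xs generalizing s with
  | nil => simp [PySem.List.enumerate_nil]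
  | cons x xs ih => simp [PySem.List.enumerate_cons, ih]

theorem gci_cons (x : String) (xs : List String) :
    get_command_indices (x :: xs) =
      (if PySem.Str.isIn "$" x then [(0 : Int)] else []) ++ (get_command_indices xs).map (· + 1) := by
  unfold get_command_indices
  rw [PySem.List.enumerate_cons, show (0 : Int) + 1 = 0 + 1 by rfl, enumerate_shift]
  by_cases h : PySem.Chars.isIn ['$'] x.toList <;>
    simp [h, List.filter_map, List.map_map, Function.comp_def]

theorem mem_gci_nonneg {xs : List String} {i : Int} (h : i ∈ get_command_indices xs) : 0 ≤ i := by
  unfold get_command_indices at h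
  obtain ⟨p, hp, rfl⟩ := List.mem_map.mp h
  have := List.mem_filter.mp hp |>.1
  obtain ⟨k, hk, rfl⟩ := (PySem.List.mem_enumerate_iff _ _ _).mp this
  simp

theorem stepA_shift (x : String) (xs : List String)
    (st : PySem.Dict String (List String) × List String) {i : Int} (hi : 0 ≤ i) :
    stepA (x :: xs) st (i + 1) = stepA xs st i := by
  obtain ⟨n, rfl⟩ := Int.eq_ofNat_of_zero_le hi
  have hcmd : PySem.List.pyGetD (x :: xs) ((n : Int) + 1) "" = PySem.List.pyGetD xs (n : Int) "" := by
    rw [show ((n : Int) + 1) = ((n + 1 : Nat) : Int) by push_cast; ring,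
        PySem.List.pyGetD_natCast, PySem.List.pyGetD_natCast, List.getD_cons_succ]
  have hsub : generate_sub_tree (x :: xs) ((n : Int) + 1) = generate_sub_tree xs (n : Int) := by
    unfold generate_sub_tree
    rw [show ((n : Int) + 1 + 1) = ((n + 2 : Nat) : Int) by push_cast; ring,
        show ((n : Int) + 1) = ((n + 1 : Nat) : Int) by push_cast; ring,
        PySem.List.slice_from_natCast, PySem.List.slice_from_natCast]
    rfl
  unfold stepA
  rw [hcmd, hsub]

theorem foldl_stepA_shift (x : String) (xs : List String) (idxs : List Int)
    (hnn : ∀ i ∈ idxs, 0 ≤ i) (st : PySem.Dict String (List String) × List String) :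
    (idxs.map (· + 1)).foldl (stepA (x :: xs)) st = idxs.foldl (stepA xs) st := by
  induction idxs generalizing st with
  | nil => rfl
  | cons i is ih =>
    simp only [List.map_cons, List.foldl_cons]
    rw [stepA_shift x xs st (hnn i (by simp)), ih (fun j hj => hnn j (by simp [hj]))]

theorem foldA_eq_runA (xs : List String) (tree : PySem.Dict String (List String))
    (stack : List String) :
    ((get_command_indices xs).foldl (stepA xs) (tree, stack)).1 = runA tree stack xs := by
  induction xs generalizing tree stack with
  | nil => simp [get_command_indices, PySem.List.enumerate_nil, runA]
  | cons x xs ih =>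
    rw [gci_cons]
    by_cases h : PySem.Chars.isIn ['$'] x.toList
    · simp [h]
      by_cases hcd : PySem.Chars.isIn ['c','d'] x.toList
      · have h0 : stepA (x :: xs) (tree, stack) 0 =
            (tree, update_directory stack
              (PySem.List.pyGetD ((PySem.Str.split? x "cd ").getD []) (-1) "")) := by
          unfold stepA
          simp [PySem.List.pyGetD_zero_cons, hcd]
        rw [h0, foldl_stepA_shift x xs _ (fun i hi => mem_gci_nonneg hi), ih]
        simp [runA, h, hcd]
      · have h0 : stepA (x :: xs) (tree, stack) 0 =
            (tree.insert (PySem.List.pyGetD stack (-1) "")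
              (xs.takeWhile (fun l => !PySem.Str.isIn "$" l)), stack) := by
          unfold stepA generate_sub_tree
          rw [show ((0 : Int) + 1) = ((1 : Nat) : Int) by norm_num,
              PySem.List.slice_from_natCast]
          simp [PySem.List.pyGetD_zero_cons, hcd, gen_sub_loop_eq]
        rw [h0, foldl_stepA_shift x xs _ (fun i hi => mem_gci_nonneg hi), ih]
        simp [runA, h, hcd]
    · simp [h]
      rw [foldl_stepA_shift x xs _ (fun i hi => mem_gci_nonneg hi), ih]
      simp [runA, h]

-- B's pass equals runA; the conjunct Q handles an open `ls` block
theorem alt_go_eq_runA (l : List String) :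
    (∀ (tree : PySem.Dict String (List String)) (stack : List String),
      alt_go tree stack none l = runA tree stack l) ∧
    (∀ (tree : PySem.Dict String (List String)) (stack : List String) (k : String)
      (acc : List String), alt_go (tree.insert k acc) stack (some k) l =
      runA (tree.insert k (acc ++ l.takeWhile (fun s => !PySem.Str.isIn "$" s))) stack l) := by
  induction l with
  | nil => constructor <;> intros <;> simp [alt_go, runA]
  | cons x xs ih =>
    obtain ⟨ihP, ihQ⟩ := ih
    have hP : ∀ (tree : PySem.Dict String (List String)) (stack : List String),
        alt_go tree stack none (x :: xs) = runA tree stack (x :: xs) := by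
      intro tree stack
      by_cases h : PySem.Chars.isIn ['$'] x.toList
      · by_cases hcd : PySem.Chars.isIn ['c','d'] x.toList
        · simp [alt_go, runA, h, hcd, update_directory]
          exact ihP _ _
        · simp [alt_go, runA, h, hcd]
          rw [ihQ]
          simp
      · simp [alt_go, runA, h]
        exact ihP _ _
    refine ⟨hP, ?_⟩
    intro tree stack k acc
    by_cases h : PySem.Chars.isIn ['$'] x.toList
    · by_cases hcd : PySem.Chars.isIn ['c','d'] x.toList
      · simp [alt_go, runA, h, hcd, update_directory]
        exact ihP _ _
      · simp [alt_go, runA, h, hcd]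
        rw [ihQ]
        simp
    · have hmod : (tree.insert k acc).modify k [] (· ++ [x]) = tree.insert k (acc ++ [x]) := by
        unfold PySem.Dict.modify
        rw [PySem.Dict.getD_insert_self, PySem.Dict.insert_insert_self]
      simp [alt_go, runA, h, hmod]
      rw [ihQ]
      simp

-- ===== VERDICT (by name: the statement is the Claim_ definition above) =====
theorem find_directory_contents_spec : Claim_equal_find_directory_contents := by
  intro raw_data _ _
  unfold Spec_find_directory_contents find_directory_contents_alt
  have h1 := foldA_eq_runA raw_data PySem.Dict.empty ["/"]
  have h2 := (alt_go_eq_runA raw_data).1 PySem.Dict.empty ["/"]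
  rw [find_eq_foldl_stepA, h1, h2]
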